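-- pv_equiv track=rewrite | github.com/chalos18/COSC-Studies | COSC367/practice.py | interpretations
-- ===== SOURCE A (Python) =====
-- import itertools
--
-- def interpretations(atoms):
--     atoms = sorted(atoms)
--     interpretation_list = sorted(itertools.product([True, False], repeat=len(atoms)))
--
--     result = []
--     for truth in interpretation_list:
--         interpretation = dict(zip(atoms, truth))
--         result.append(interpretation)
--
--     return result
-- ===== SOURCE B (Python) =====
-- def interpretations(atoms):
--     atoms = sorted(atoms)
--     result = [{}]
--     for a in atoms:
--         result = [{**d, a: v} for d in result for v in (False, True)]
--     return result
-- ===== Notes on version B (the rewrite author's own statement) =====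
-- stated objective: alternative
-- what changed: B builds the list of assignment dicts directly in ascending order by doubling it per sorted atom (False branch then True branch), instead of materialising all 2^n bool tuples with itertools.product, sorting them, and zipping each into a dict.
import Mathlib
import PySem

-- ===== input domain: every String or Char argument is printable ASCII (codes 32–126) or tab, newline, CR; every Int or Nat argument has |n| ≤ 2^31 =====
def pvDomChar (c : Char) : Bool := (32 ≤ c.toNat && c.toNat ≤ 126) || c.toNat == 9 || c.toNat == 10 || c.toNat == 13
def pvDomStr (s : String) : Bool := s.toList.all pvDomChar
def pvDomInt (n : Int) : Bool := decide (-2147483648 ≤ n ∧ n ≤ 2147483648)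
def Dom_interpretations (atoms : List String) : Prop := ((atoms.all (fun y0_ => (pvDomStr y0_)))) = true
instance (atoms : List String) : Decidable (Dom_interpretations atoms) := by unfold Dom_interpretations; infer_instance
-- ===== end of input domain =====

-- B builds the 2^n assignment dicts directly in ascending order by doubling the dict list
-- per atom (False branch before True branch), instead of materialising all bool tuples with
-- itertools.product, sorting them and zipping each into a dict (objective: alternative).

-- ===== PORT A =====
-- itertools.product([True, False], repeat=n), exactly as CPython generates it
-- (each factor extends every existing tuple at the end, True before False)
def pvProdTF : Nat → List (List Bool)
  | 0 => [[]]
  | n + 1 => (pvProdTF n).flatMap (fun t => [t ++ [true], t ++ [false]])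

def interpretations (atoms : List String) : List (List (String × Bool)) :=
  let atoms' := PySem.List.sorted atoms (fun x => x) false
  let interpretation_list := PySem.List.sorted (pvProdTF atoms'.length) (fun x => x) false
  let result := interpretation_list.foldl
    (fun result truth => result ++ [(PySem.Dict.ofList (atoms'.zip truth)).items]) []
  result

-- ===== PORT B =====
def interpretations_alt (atoms : List String) : List (List (String × Bool)) :=
  let atoms' := PySem.List.sorted atoms (fun x => x) false
  let result := atoms'.foldl
    (fun result a => result.flatMap (fun d => [d.insert a false, d.insert a true]))
    [(PySem.Dict.empty : PySem.Dict String Bool)]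
  result.map (fun d => d.items)

-- ===== PRECONDITION & SPEC =====
def Spec_interpretations (atoms : List String) (out : List (List (String × Bool))) : Prop := out = interpretations_alt atoms
instance (atoms : List String) (out : List (List (String × Bool))) : Decidable (Spec_interpretations atoms out) := by unfold Spec_interpretations; infer_instance

-- ===== CLAIM (what is proved, stated in full; the proofs are below) =====
def Claim_equal_interpretations : Prop := ∀ (atoms : List String), Dom_interpretations atoms → Spec_interpretations atoms (interpretations atoms)

-- ===== LEMMAS AND PROOFS =====

-- the 2^n length-n bool lists in ascending lexicographic order (False < True)
def pvCtr : Nat → List (List Bool)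
  | 0 => [[]]
  | n + 1 => (pvCtr n).flatMap (fun t => [t ++ [false], t ++ [true]])

lemma pvProdTF_eq_reverse_ctr (n : Nat) : pvProdTF n = (pvCtr n).reverse := by
  induction n with
  | zero => rfl
  | succ n ih =>
    simp only [pvProdTF, pvCtr, ih, List.reverse_flatMap]
    rfl

lemma pvCtr_length {n : Nat} {t : List Bool} (h : t ∈ pvCtr n) : t.length = n := by
  induction n generalizing t with
  | zero => simp [pvCtr] at h; simp [h]
  | succ n ih =>
    simp only [pvCtr, List.mem_flatMap, List.mem_cons] at h
    obtain ⟨u, hu, ht⟩ := h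
    have hu' := ih hu
    rcases ht with ht | ht | ht <;> simp_all

lemma pvLt_snoc {t₁ t₂ : List Bool} (x y : Bool) (hlen : t₁.length = t₂.length)
    (h : t₁ < t₂) : t₁ ++ [x] < t₂ ++ [y] := by
  induction t₁ generalizing t₂ with
  | nil =>
    cases t₂ with
    | nil => exact absurd h (by exact fun h => (List.lt_irrefl _ h))
    | cons b l => simp at hlen
  | cons a l ih =>
    cases t₂ with
    | nil => simp at hlen
    | cons b m =>
      rcases List.cons_lt_cons_iff.mp h with hab | ⟨hab, hlm⟩
      · exact List.cons_lt_cons_iff.mpr (Or.inl hab)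
      · exact List.cons_lt_cons_iff.mpr (Or.inr ⟨hab, ih (by simpa using hlen) hlm⟩)

lemma pvPairwise_flatMap {n : Nat} {l : List (List Bool)} (hp : l.Pairwise (· < ·))
    (hlen : ∀ t ∈ l, t.length = n) :
    (l.flatMap (fun t => [t ++ [false], t ++ [true]])).Pairwise (· < ·) := by
  induction l with
  | nil => simp
  | cons t l ih =>
    rw [List.flatMap_cons]
    refine List.pairwise_append.mpr ⟨?_, ih hp.of_cons (fun u hu => hlen u (List.mem_cons_of_mem _ hu)), ?_⟩
    · refine List.pairwise_cons.mpr ⟨?_, by simp⟩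
      intro y hy
      rw [List.mem_singleton] at hy
      subst hy
      exact List.append_left_lt (List.Lex.rel (by decide))
    · intro x hx y hy
      rw [List.mem_flatMap] at hy
      obtain ⟨u, hu, hy⟩ := hy
      have htu : t < u := (List.pairwise_cons.mp hp).1 u hu
      have hl : t.length = u.length := by
        rw [hlen t List.mem_cons_self, hlen u (List.mem_cons_of_mem _ hu)]
      rcases List.mem_cons.mp hx with rfl | hx
      · rcases List.mem_cons.mp hy with rfl | hy
        · exact pvLt_snoc _ _ hl htu
        · rw [List.mem_singleton] at hy; subst hy; exact pvLt_snoc _ _ hl htu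
      · rw [List.mem_singleton] at hx; subst hx
        rcases List.mem_cons.mp hy with rfl | hy
        · exact pvLt_snoc _ _ hl htu
        · rw [List.mem_singleton] at hy; subst hy; exact pvLt_snoc _ _ hl htu

lemma pvCtr_pairwise (n : Nat) : (pvCtr n).Pairwise (· < ·) := by
  induction n with
  | zero => simp [pvCtr]
  | succ n ih =>
    exact pvPairwise_flatMap ih (fun t ht => pvCtr_length ht)

lemma pvSorted_prodTF (n : Nat) :
    PySem.List.sorted (pvProdTF n) (fun x => x) false = pvCtr n := by
  rw [show (fun (a b : List Bool) => a.decidableLT b) = (LinearOrder.toDecidableLT : DecidableLT (List Bool)) from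
    funext fun a => funext fun b => Subsingleton.elim _ _]
  exact PySem.List.sorted_eq_of_perm_of_pairwise_lt _ _ _
    (pvProdTF_eq_reverse_ctr n ▸ (List.reverse_perm _).symm) (pvCtr_pairwise n)

lemma pvFold_eq (as : List String) :
    as.foldl (fun res a => res.flatMap (fun d => [d.insert a false, d.insert a true]))
      [(PySem.Dict.empty : PySem.Dict String Bool)]
    = (pvCtr as.length).map (fun t => PySem.Dict.ofList (as.zip t)) := by
  induction as using List.reverseRecOn with
  | nil => rfl
  | append_singleton as a ih =>
    rw [List.foldl_append, List.foldl_cons, List.foldl_nil, ih]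
    simp only [List.length_append, List.length_cons, List.length_nil, Nat.zero_add, pvCtr]
    rw [List.flatMap_map, List.map_flatMap]
    refine List.flatMap_congr (fun t ht => ?_)
    have hlen : as.length = t.length := (pvCtr_length ht).symm
    have hz : ∀ v : Bool, PySem.Dict.ofList ((as ++ [a]).zip (t ++ [v]))
        = (PySem.Dict.ofList (as.zip t)).insert a v := by
      intro v
      rw [List.zip_append hlen]
      simp [PySem.Dict.ofList, PySem.Dict.update, List.foldl_append]
    simp [hz]

theorem pvA_eq (atoms : List String) :
    interpretations atoms = interpretations_alt atoms := by
  unfold interpretations interpretations_alt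
  dsimp only
  rw [pvSorted_prodTF, pvFold_eq, PySem.List.foldl_append_singleton_eq_map, List.map_map]
  rfl

-- ===== VERDICT (by name: the statement is the Claim_ definition above) =====
theorem interpretations_spec : Claim_equal_interpretations := by
  intro atoms _
  exact pvA_eq atoms
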